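-- pv_equiv track=rewrite | github.com/TRACKCOMPLETE/goro-awase | goroawase.py | check_pos_usage
-- ===== SOURCE A (Python) =====
-- def check_pos_usage(parsed: list[str]) -> bool:
--     """
--     動詞活用、助動詞の使い方、助詞の意味的使い方、否定接頭辞などをチェック
--     """
--     tokens = []
--     prev_pos = None
--     NEGATIVE_PREFIX_RULES = {
--         "不": {"形状詞", "名詞", "形容動詞"},
--         "未": {"名詞"},
--         "無": {"名詞"},
--         "非": {"名詞"},
--     }
--
--     for line in parsed:
--         if line == "EOS" or not line.strip():
--             continue
--         cols = line.split("\t")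
--         if len(cols) < 7:
--             continue
--         surface = cols[0]
--         pos_detail = cols[4]
--         pos = pos_detail.split("-")[0]
--         conj_form = cols[6]
--         tokens.append((surface, pos, pos_detail, conj_form))
--
--     # 動詞の活用形チェック（未然形、仮定形はNG）
--     for _, pos, pos_detail, conj_form in tokens:
--         if pos == "動詞" and (conj_form.startswith("未然形") or conj_form.startswith("仮定形")):
--             return False
--
--     # 助動詞の前が動詞であること
--     for i, (_, pos, _, _) in enumerate(tokens):
--         if pos == "助動詞":
--             if i == 0 or tokens[i - 1][1] != "動詞":
--                 return False
--
--     # 助詞の意味的使い方チェック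
--     for i, (surface, pos, _, _) in enumerate(tokens):
--         if pos != "助詞":
--             continue
--         if i == 0 or i == len(tokens) - 1:
--             return False  # 文頭文末の助詞はNG
--         prev_pos = tokens[i - 1][1]
--         next_pos = tokens[i + 1][1]
--
--         if surface == "が":
--             if prev_pos != "名詞" or next_pos not in {"動詞", "形容詞", "名詞"}:
--                 return False
--         elif surface == "を":
--             if prev_pos != "名詞" or next_pos != "動詞":
--                 return False
--         elif surface == "に":
--             if prev_pos != "名詞" or next_pos not in {"動詞", "名詞"}:
--                 return False
--         elif surface == "の":
--             if prev_pos != "名詞" or next_pos != "名詞":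
--                 return False
--         elif surface == "と":
--             if prev_pos != "名詞" or next_pos not in {"名詞", "動詞"}:
--                 return False
--         elif surface == "で":
--             if prev_pos != "名詞" or next_pos not in {"動詞", "形容詞"}:
--                 return False
--         else:
--             return False  # 未知の助詞はNG
--
--     # 否定接頭辞の使い方チェック
--     for i in range(len(tokens) - 1):
--         surface1, pos1, pos_detail1, _ = tokens[i]
--         surface2, pos2, _, _ = tokens[i + 1]
--
--         if surface1 in NEGATIVE_PREFIX_RULES and pos_detail1.startswith("接頭辞"):
--             allowed_pos = NEGATIVE_PREFIX_RULES[surface1]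
--             if pos2 not in allowed_pos:
--                 return False
--
--     # 接尾辞チェック
--     if tokens and tokens[0][2].startswith("接尾辞"):
--         return False
--     for i in range(len(tokens) - 1):
--         _, _, pos_detail, _ = tokens[i]
--         _, _, next_pos_detail, _ = tokens[i + 1]
--         if pos_detail.startswith("接尾辞") and next_pos_detail.startswith("接尾辞"):
--             return False
--
--     # 接頭辞が文末に来るのはNG
--     if tokens and tokens[-1][2].startswith("接頭辞"):
--         return False
--
--     return True
-- ===== SOURCE B (Python) =====
-- NEGATIVE_PREFIX_RULES = {
--     "不": ["形状詞", "名詞", "形容動詞"],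
--     "未": ["名詞"],
--     "無": ["名詞"],
--     "非": ["名詞"],
-- }
--
-- # particle -> (allowed previous POS list, allowed next POS list)
-- PARTICLE_RULES = {
--     "が": (["名詞"], ["動詞", "形容詞", "名詞"]),
--     "を": (["名詞"], ["動詞"]),
--     "に": (["名詞"], ["動詞", "名詞"]),
--     "の": (["名詞"], ["名詞"]),
--     "と": (["名詞"], ["名詞", "動詞"]),
--     "で": (["名詞"], ["動詞", "形容詞"]),
-- }
--
--
-- def _token(line):
--     """Parse one mecab-style line into (surface, pos, pos_detail, conj_form), or None."""
--     if line == "EOS" or not line.strip():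
--         return None
--     cols = line.split("\t")
--     if len(cols) < 7:
--         return None
--     return (cols[0], cols[4].split("-")[0], cols[4], cols[6])
--
--
-- def check_pos_usage(parsed: list[str]) -> bool:
--     """
--     動詞活用、助動詞の使い方、助詞の意味的使い方、否定接頭辞などをチェック
--     (single pass over the token list, all rules fused per index)
--     """
--     tokens = [t for t in map(_token, parsed) if t is not None]
--     n = len(tokens)
--     for i, (surface, pos, pos_detail, conj_form) in enumerate(tokens):
--         prev_pos = tokens[i - 1][1] if i > 0 else None
--         nxt = tokens[i + 1] if i < n - 1 else None
--
--         if pos == "動詞" and (conj_form.startswith("未然形") or conj_form.startswith("仮定形")):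
--             return False
--         if pos == "助動詞" and prev_pos != "動詞":
--             return False
--         if pos == "助詞":
--             rule = PARTICLE_RULES.get(surface)
--             if (rule is None or prev_pos is None or nxt is None
--                     or prev_pos not in rule[0] or nxt[1] not in rule[1]):
--                 return False
--         allowed = NEGATIVE_PREFIX_RULES.get(surface)
--         if (allowed is not None and pos_detail.startswith("接頭辞")
--                 and nxt is not None and nxt[1] not in allowed):
--             return False
--         if pos_detail.startswith("接尾辞") and (
--                 i == 0 or (nxt is not None and nxt[2].startswith("接尾辞"))):
--             return False
--         if nxt is None and pos_detail.startswith("接頭辞"):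
--             return False
--     return True
-- ===== Notes on version B (the rewrite author's own statement) =====
-- stated objective: simpler
-- what changed: A's six separate validation passes plus two boundary checks are fused into one single indexed pass over the token list, and the per-particle neighbour constraints move from an if/elif chain into a rule table.
import Mathlib
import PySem

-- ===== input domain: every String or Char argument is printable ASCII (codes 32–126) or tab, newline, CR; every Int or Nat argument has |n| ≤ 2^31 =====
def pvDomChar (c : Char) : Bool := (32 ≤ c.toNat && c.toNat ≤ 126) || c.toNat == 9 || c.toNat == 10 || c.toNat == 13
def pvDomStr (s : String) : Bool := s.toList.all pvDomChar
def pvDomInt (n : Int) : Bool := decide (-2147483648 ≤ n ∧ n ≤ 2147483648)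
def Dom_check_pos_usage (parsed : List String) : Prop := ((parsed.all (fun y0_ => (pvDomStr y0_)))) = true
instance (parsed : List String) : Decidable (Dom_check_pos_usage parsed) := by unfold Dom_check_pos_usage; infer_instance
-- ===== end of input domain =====

-- B fuses A's six separate validation passes into one single indexed pass with a particle rule table (objective: simpler);
-- the equivalence below is proved for ALL inputs, not only those in Dom_.

-- a parsed token: (surface, pos, pos_detail, conj_form)
abbrev pvTok := String × String × String × String

def pvTokD : pvTok := ("", "", "", "")

-- shared constant table (data only): NEGATIVE_PREFIX_RULES, values are Python sets of strings (distinct elements)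
def pvNegRules : PySem.Dict String (List String) :=
  PySem.Dict.mk [("不", ["形状詞", "名詞", "形容動詞"]), ("未", ["名詞"]), ("無", ["名詞"]), ("非", ["名詞"])]

-- ===== PORT A =====

-- the token-building loop of A (cols[0]/cols[4]/cols[6] are in range because of the length test, so getD is exact)
def pvTokensA (parsed : List String) : List pvTok :=
  parsed.foldl (fun tokens line =>
    if line == "EOS" || PySem.Str.strip line == "" then tokens
    else
      let cols := (PySem.Str.split? line "\t").getD []
      if cols.length < 7 then tokens
      else
        let surface := cols.getD 0 ""
        let pos_detail := cols.getD 4 ""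
        let pos := ((PySem.Str.split? pos_detail "-").getD []).getD 0 ""
        let conj_form := cols.getD 6 ""
        tokens ++ [(surface, pos, pos_detail, conj_form)]) []

-- 動詞の活用形チェック
def pvALoop1 : List pvTok → Bool
  | [] => true
  | (_, pos, _, conj_form) :: rest =>
    if pos == "動詞" && (PySem.Str.startswith conj_form "未然形" || PySem.Str.startswith conj_form "仮定形")
    then false else pvALoop1 rest

-- 助動詞の前が動詞であること (tokens[i-1] is in range when i ≠ 0, so getD is exact)
def pvALoop2 (toks : List pvTok) : Int → List pvTok → Bool
  | _, [] => true
  | i, (_, pos, _, _) :: rest =>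
    if pos == "助動詞" then
      if i == 0 || ((PySem.List.pyGet? toks (i - 1)).getD pvTokD).2.1 != "動詞" then false
      else pvALoop2 toks (i + 1) rest
    else pvALoop2 toks (i + 1) rest

-- 助詞の意味的使い方チェック (neighbour accesses are in range because i ≠ 0 and i ≠ n-1)
def pvALoop3 (toks : List pvTok) (n : Int) : Int → List pvTok → Bool
  | _, [] => true
  | i, (surface, pos, _, _) :: rest =>
    if pos != "助詞" then pvALoop3 toks n (i + 1) rest
    else if i == 0 || i == n - 1 then false
    else
      let prev_pos := ((PySem.List.pyGet? toks (i - 1)).getD pvTokD).2.1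
      let next_pos := ((PySem.List.pyGet? toks (i + 1)).getD pvTokD).2.1
      if surface == "が" then
        if prev_pos != "名詞" || !(["動詞", "形容詞", "名詞"].contains next_pos) then false
        else pvALoop3 toks n (i + 1) rest
      else if surface == "を" then
        if prev_pos != "名詞" || next_pos != "動詞" then false
        else pvALoop3 toks n (i + 1) rest
      else if surface == "に" then
        if prev_pos != "名詞" || !(["動詞", "名詞"].contains next_pos) then false
        else pvALoop3 toks n (i + 1) rest
      else if surface == "の" then
        if prev_pos != "名詞" || next_pos != "名詞" then false
        else pvALoop3 toks n (i + 1) rest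
      else if surface == "と" then
        if prev_pos != "名詞" || !(["名詞", "動詞"].contains next_pos) then false
        else pvALoop3 toks n (i + 1) rest
      else if surface == "で" then
        if prev_pos != "名詞" || !(["動詞", "形容詞"].contains next_pos) then false
        else pvALoop3 toks n (i + 1) rest
      else false

-- 否定接頭辞の使い方チェック: loop over range(len(tokens)-1); indices are in range, getD is exact
def pvALoop4 (toks : List pvTok) : List Int → Bool
  | [] => true
  | i :: rest =>
    let t1 := (PySem.List.pyGet? toks i).getD pvTokD
    let t2 := (PySem.List.pyGet? toks (i + 1)).getD pvTokD
    match PySem.Dict.get? pvNegRules t1.1 with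
    | some allowed =>
      if PySem.Str.startswith t1.2.2.1 "接頭辞" then
        if !(allowed.contains t2.2.1) then false else pvALoop4 toks rest
      else pvALoop4 toks rest
    | none => pvALoop4 toks rest

-- 接尾辞チェック (adjacent pair loop over range(len(tokens)-1))
def pvALoop5 (toks : List pvTok) : List Int → Bool
  | [] => true
  | i :: rest =>
    let d1 := ((PySem.List.pyGet? toks i).getD pvTokD).2.2.1
    let d2 := ((PySem.List.pyGet? toks (i + 1)).getD pvTokD).2.2.1
    if PySem.Str.startswith d1 "接尾辞" && PySem.Str.startswith d2 "接尾辞" then false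
    else pvALoop5 toks rest

def check_pos_usage (parsed : List String) : Bool :=
  let tokens := pvTokensA parsed
  if !pvALoop1 tokens then false
  else if !pvALoop2 tokens 0 tokens then false
  else if !pvALoop3 tokens (tokens.length : Int) 0 tokens then false
  else if !pvALoop4 tokens (PySem.List.pyRange 0 ((tokens.length : Int) - 1) 1) then false
  else if (match tokens with
           | [] => false
           | t :: _ => PySem.Str.startswith t.2.2.1 "接尾辞") then false
  else if !pvALoop5 tokens (PySem.List.pyRange 0 ((tokens.length : Int) - 1) 1) then false
  else if (match PySem.List.pyGet? tokens (-1) with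
           | some t => PySem.Str.startswith t.2.2.1 "接頭辞"
           | none => false) then false
  else true

-- ===== PORT B =====

-- particle -> (allowed previous POS list, allowed next POS list)
def pvParticleRules : PySem.Dict String (List String × List String) :=
  PySem.Dict.mk
    [("が", (["名詞"], ["動詞", "形容詞", "名詞"])),
     ("を", (["名詞"], ["動詞"])),
     ("に", (["名詞"], ["動詞", "名詞"])),
     ("の", (["名詞"], ["名詞"])),
     ("と", (["名詞"], ["名詞", "動詞"])),
     ("で", (["名詞"], ["動詞", "形容詞"]))]

-- _token(line): one mecab-style line to a token, or None (indices in range by the length test, getD exact)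
def pvToken? (line : String) : Option pvTok :=
  if line == "EOS" || PySem.Str.strip line == "" then none
  else
    let cols := (PySem.Str.split? line "\t").getD []
    if cols.length < 7 then none
    else some (cols.getD 0 "", ((PySem.Str.split? (cols.getD 4 "") "-").getD []).getD 0 "", cols.getD 4 "", cols.getD 6 "")

-- the single fused pass of B (i counts the index, the list argument is the remaining tokens)
def pvBLoop (toks : List pvTok) (n : Int) : Int → List pvTok → Bool
  | _, [] => true
  | i, (surface, pos, pos_detail, conj_form) :: rest =>
    let prev_pos : Option String := if 0 < i then (PySem.List.pyGet? toks (i - 1)).map (fun t => t.2.1) else none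
    let nxt : Option pvTok := if i < n - 1 then PySem.List.pyGet? toks (i + 1) else none
    if pos == "動詞" && (PySem.Str.startswith conj_form "未然形" || PySem.Str.startswith conj_form "仮定形") then false
    else if pos == "助動詞" && prev_pos != some "動詞" then false
    else if pos == "助詞" &&
      !(match PySem.Dict.get? pvParticleRules surface, prev_pos, nxt with
        | some rule, some pp, some t2 => rule.1.contains pp && rule.2.contains t2.2.1
        | _, _, _ => false) then false
    else if (match PySem.Dict.get? pvNegRules surface, nxt with
             | some allowed, some t2 => PySem.Str.startswith pos_detail "接頭辞" && !(allowed.contains t2.2.1)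
             | _, _ => false) then false
    else if PySem.Str.startswith pos_detail "接尾辞" &&
            (i == 0 || (match nxt with | some t2 => PySem.Str.startswith t2.2.2.1 "接尾辞" | none => false)) then false
    else if nxt == none && PySem.Str.startswith pos_detail "接頭辞" then false
    else pvBLoop toks n (i + 1) rest

def check_pos_usage_alt (parsed : List String) : Bool :=
  let tokens := parsed.filterMap pvToken?
  pvBLoop tokens (tokens.length : Int) 0 tokens

-- ===== PRECONDITION & SPEC =====
def Spec_check_pos_usage (parsed : List String) (out : Bool) : Prop := out = check_pos_usage_alt parsed
instance (parsed : List String) (out : Bool) : Decidable (Spec_check_pos_usage parsed out) := by unfold Spec_check_pos_usage; infer_instance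

-- ===== CLAIM (what is proved, stated in full; the proofs are below) =====
def Claim_equal_check_pos_usage : Prop := ∀ (parsed : List String), Dom_check_pos_usage parsed → Spec_check_pos_usage parsed (check_pos_usage parsed)


-- ===== LEMMAS AND PROOFS =====

-- "all f i for a ≤ i < b" — the common shape both sides are reduced to
def pvRangeAll (f : Int → Bool) (a b : Int) : Bool :=
  if a < b then f a && pvRangeAll f (a + 1) b else true
termination_by (b - a).toNat
decreasing_by simp_wf; omega

theorem pvRangeAll_neg (f : Int → Bool) {a b : Int} (h : b ≤ a) : pvRangeAll f a b = true := by
  rw [pvRangeAll, if_neg (by omega)]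

theorem pvRangeAll_cons (f : Int → Bool) {a b : Int} (h : a < b) :
    pvRangeAll f a b = (f a && pvRangeAll f (a + 1) b) := by
  rw [pvRangeAll, if_pos h]

theorem pvRangeAll_of_forall (f : Int → Bool) (a b : Int)
    (h : ∀ i, a ≤ i → i < b → f i = true) : pvRangeAll f a b = true := by
  by_cases hab : a < b
  · rw [pvRangeAll_cons f hab, h a le_rfl hab,
      pvRangeAll_of_forall f (a + 1) b (fun i h1 h2 => h i (by omega) h2)]
    rfl
  · exact pvRangeAll_neg f (by omega)
termination_by (b - a).toNat
decreasing_by simp_wf; omega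

theorem pvRangeAll_congr {f g : Int → Bool} (a b : Int)
    (h : ∀ i, a ≤ i → i < b → f i = g i) : pvRangeAll f a b = pvRangeAll g a b := by
  by_cases hab : a < b
  · rw [pvRangeAll_cons f hab, pvRangeAll_cons g hab, h a le_rfl hab,
      pvRangeAll_congr (a + 1) b (fun i h1 h2 => h i (by omega) h2)]
  · rw [pvRangeAll_neg f (by omega), pvRangeAll_neg g (by omega)]
termination_by (b - a).toNat
decreasing_by simp_wf; omega

theorem pvRangeAll_and (f g : Int → Bool) (a b : Int) :
    pvRangeAll (fun i => f i && g i) a b = (pvRangeAll f a b && pvRangeAll g a b) := by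
  by_cases hab : a < b
  · rw [pvRangeAll_cons _ hab, pvRangeAll_cons f hab, pvRangeAll_cons g hab,
      pvRangeAll_and f g (a + 1) b]
    cases f a <;> cases g a <;> simp
  · rw [pvRangeAll_neg _ (by omega), pvRangeAll_neg f (by omega), pvRangeAll_neg g (by omega)]
    rfl
termination_by (b - a).toNat
decreasing_by simp_wf; omega

theorem pvRangeAll_eq_single (f : Int → Bool) (a b k : Int) (hk1 : a ≤ k) (hk2 : k < b)
    (h : ∀ i, a ≤ i → i < b → i ≠ k → f i = true) : pvRangeAll f a b = f k := by
  by_cases hak : a = k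
  · subst hak
    rw [pvRangeAll_cons f hk2,
      pvRangeAll_of_forall f (a + 1) b (fun i h1 h2 => h i (by omega) h2 (by omega))]
    cases f a <;> rfl
  · rw [pvRangeAll_cons f (by omega), h a le_rfl (by omega) (by omega),
      pvRangeAll_eq_single f (a + 1) b k (by omega) hk2 (fun i h1 h2 h3 => h i (by omega) h2 h3)]
    rfl
termination_by (b - a).toNat
decreasing_by simp_wf; omega

theorem pvRangeAll_extend (f : Int → Bool) (a b c : Int) (h1 : a ≤ b) (h2 : b ≤ c)
    (h : ∀ i, b ≤ i → i < c → f i = true) : pvRangeAll f a c = pvRangeAll f a b := by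
  by_cases hab : a < b
  · rw [pvRangeAll_cons f (by omega), pvRangeAll_cons f hab,
      pvRangeAll_extend f (a + 1) b c (by omega) h2 h]
  · have e1 : pvRangeAll f a c = true :=
      pvRangeAll_of_forall f a c (fun i hi1 hi2 => h i (by omega) hi2)
    have e2 : pvRangeAll f a b = true := pvRangeAll_neg f (by omega)
    rw [e1, e2]
termination_by (b - a).toNat
decreasing_by simp_wf; omega

-- the per-index predicates A's loops compute
def pvGetT (toks : List pvTok) (i : Int) : pvTok := (PySem.List.pyGet? toks i).getD pvTokD

def pvF1 (toks : List pvTok) (i : Int) : Bool :=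
  let t := pvGetT toks i
  !(t.2.1 == "動詞" && (PySem.Str.startswith t.2.2.2 "未然形" || PySem.Str.startswith t.2.2.2 "仮定形"))

def pvF2 (toks : List pvTok) (i : Int) : Bool :=
  let t := pvGetT toks i
  !(t.2.1 == "助動詞" && (i == 0 || (pvGetT toks (i - 1)).2.1 != "動詞"))

def pvPart3 (surface prev_pos next_pos : String) : Bool :=
  if surface == "が" then !(prev_pos != "名詞" || !(["動詞", "形容詞", "名詞"].contains next_pos))
  else if surface == "を" then !(prev_pos != "名詞" || next_pos != "動詞")
  else if surface == "に" then !(prev_pos != "名詞" || !(["動詞", "名詞"].contains next_pos))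
  else if surface == "の" then !(prev_pos != "名詞" || next_pos != "名詞")
  else if surface == "と" then !(prev_pos != "名詞" || !(["名詞", "動詞"].contains next_pos))
  else if surface == "で" then !(prev_pos != "名詞" || !(["動詞", "形容詞"].contains next_pos))
  else false

def pvF3 (toks : List pvTok) (n i : Int) : Bool :=
  let t := pvGetT toks i
  if t.2.1 != "助詞" then true
  else if i == 0 || i == n - 1 then false
  else pvPart3 t.1 (pvGetT toks (i - 1)).2.1 (pvGetT toks (i + 1)).2.1

def pvF4 (toks : List pvTok) (i : Int) : Bool :=
  let t1 := pvGetT toks i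
  let t2 := pvGetT toks (i + 1)
  match PySem.Dict.get? pvNegRules t1.1 with
  | some allowed => !(PySem.Str.startswith t1.2.2.1 "接頭辞" && !(allowed.contains t2.2.1))
  | none => true

def pvF5 (toks : List pvTok) (i : Int) : Bool :=
  !(PySem.Str.startswith (pvGetT toks i).2.2.1 "接尾辞" &&
    PySem.Str.startswith (pvGetT toks (i + 1)).2.2.1 "接尾辞")

def pvG4 (toks : List pvTok) (n i : Int) : Bool := if i < n - 1 then pvF4 toks i else true
def pvG5 (toks : List pvTok) (n i : Int) : Bool := if i < n - 1 then pvF5 toks i else true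

def pvFhead (toks : List pvTok) (i : Int) : Bool :=
  if i == 0 then !(PySem.Str.startswith (pvGetT toks i).2.2.1 "接尾辞") else true

def pvFlast (toks : List pvTok) (n i : Int) : Bool :=
  if i == n - 1 then !(PySem.Str.startswith (pvGetT toks i).2.2.1 "接頭辞") else true

-- B's per-index condition (pvBLoop's body with the token fetched by index)
def pvFB (toks : List pvTok) (n i : Int) : Bool :=
  let t := pvGetT toks i
  let prev_pos : Option String := if 0 < i then (PySem.List.pyGet? toks (i - 1)).map (fun t => t.2.1) else none
  let nxt : Option pvTok := if i < n - 1 then PySem.List.pyGet? toks (i + 1) else none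
  if t.2.1 == "動詞" && (PySem.Str.startswith t.2.2.2 "未然形" || PySem.Str.startswith t.2.2.2 "仮定形") then false
  else if t.2.1 == "助動詞" && prev_pos != some "動詞" then false
  else if t.2.1 == "助詞" &&
    !(match PySem.Dict.get? pvParticleRules t.1, prev_pos, nxt with
      | some rule, some pp, some t2 => rule.1.contains pp && rule.2.contains t2.2.1
      | _, _, _ => false) then false
  else if (match PySem.Dict.get? pvNegRules t.1, nxt with
           | some allowed, some t2 => PySem.Str.startswith t.2.2.1 "接頭辞" && !(allowed.contains t2.2.1)
           | _, _ => false) then false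
  else if PySem.Str.startswith t.2.2.1 "接尾辞" &&
          (i == 0 || (match nxt with | some t2 => PySem.Str.startswith t2.2.2.1 "接尾辞" | none => false)) then false
  else if nxt == none && PySem.Str.startswith t.2.2.1 "接頭辞" then false
  else true


-- Bool-shape step lemmas for peeling one loop iteration
theorem pv_absorb (x y : Bool) : (x && (x || y)) = x := by cases x <;> cases y <;> rfl

theorem pv_conj6 : ∀ (c1 c2 c3 c4 c5 c6 : Bool),
    (if c1 then false else if c2 then false else if c3 then false else if c4 then false
     else if c5 then false else if c6 then false else true) =
    (!c1 && (!c2 && (!c3 && (!c4 && (!c5 && !c6))))) := by decide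

theorem pv_step1 (c x y : Bool) (h : x = y) : (if c then false else x) = (!c && y) := by
  subst h; revert c x; decide

theorem pv_step2 (c1 c2 x y : Bool) (h : x = y) :
    (if c1 then (if c2 then false else x) else x) = (!(c1 && c2) && y) := by
  subst h; revert c1 c2 x; decide

theorem pv_step6 (c1 c2 c3 c4 c5 c6 x y : Bool) (h : x = y) :
    (if c1 then false else if c2 then false else if c3 then false else if c4 then false
     else if c5 then false else if c6 then false else x) =
    ((if c1 then false else if c2 then false else if c3 then false else if c4 then false
      else if c5 then false else if c6 then false else true) && y) := by
  subst h; revert c1 c2 c3 c4 c5 c6 x; decide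

-- facts from toks.drop i = t :: rest
theorem pv_drop_get {toks : List pvTok} {i : Nat} {t : pvTok} {rest : List pvTok}
    (hl : toks.drop i = t :: rest) : toks[i]? = some t := by
  rw [← List.head?_drop, hl]; rfl

theorem pv_drop_lt {toks : List pvTok} {i : Nat} {t : pvTok} {rest : List pvTok}
    (hl : toks.drop i = t :: rest) : i < toks.length := by
  by_contra hc
  rw [List.drop_eq_nil_of_le (by omega)] at hl
  cases hl

theorem pv_drop_rest {toks : List pvTok} {i : Nat} {t : pvTok} {rest : List pvTok}
    (hl : toks.drop i = t :: rest) : toks.drop (i + 1) = rest := by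
  rw [← List.tail_drop, hl]; rfl

theorem pvALoop1_eq (toks : List pvTok) (i : Nat) :
    pvALoop1 (toks.drop i) = pvRangeAll (pvF1 toks) (i : Int) (toks.length : Int) := by
  cases hl : toks.drop i with
  | nil =>
    have hlen : toks.length ≤ i := by
      have := congrArg List.length hl; simp at this; omega
    rw [pvALoop1, pvRangeAll_neg _ (by exact_mod_cast hlen)]
  | cons t rest =>
    have hget := pv_drop_get hl
    have hlt := pv_drop_lt hl
    obtain ⟨s, pos, det, conj⟩ := t
    have hF : pvF1 toks (i : Int) =
        !(pos == "動詞" && (PySem.Str.startswith conj "未然形" || PySem.Str.startswith conj "仮定形")) := by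
      simp only [pvF1, pvGetT, PySem.List.pyGet?_natCast, hget, Option.getD_some]
    have ih := pvALoop1_eq toks (i + 1)
    rw [pv_drop_rest hl] at ih
    rw [pvRangeAll_cons _ (by exact_mod_cast hlt), hF, pvALoop1]
    push_cast at ih ⊢
    exact pv_step1 _ _ _ ih
termination_by toks.length - i
decreasing_by omega

theorem pvALoop2_eq (toks : List pvTok) (i : Nat) :
    pvALoop2 toks (i : Int) (toks.drop i) = pvRangeAll (pvF2 toks) (i : Int) (toks.length : Int) := by
  cases hl : toks.drop i with
  | nil =>
    have hlen : toks.length ≤ i := by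
      have := congrArg List.length hl; simp at this; omega
    rw [pvALoop2, pvRangeAll_neg _ (by exact_mod_cast hlen)]
  | cons t rest =>
    have hget := pv_drop_get hl
    have hlt := pv_drop_lt hl
    obtain ⟨s, pos, det, conj⟩ := t
    have hF : pvF2 toks (i : Int) =
        !(pos == "助動詞" && ((i : Int) == 0 || ((PySem.List.pyGet? toks ((i : Int) - 1)).getD pvTokD).2.1 != "動詞")) := by
      simp only [pvF2, pvGetT, PySem.List.pyGet?_natCast, hget, Option.getD_some]
    have ih := pvALoop2_eq toks (i + 1)
    rw [pv_drop_rest hl] at ih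
    rw [pvRangeAll_cons _ (by exact_mod_cast hlt), hF, pvALoop2]
    push_cast at ih ⊢
    exact pv_step2 _ _ _ _ ih
termination_by toks.length - i
decreasing_by omega

theorem pvALoop3_eq (toks : List pvTok) (n : Int) (i : Nat) :
    pvALoop3 toks n (i : Int) (toks.drop i) = pvRangeAll (pvF3 toks n) (i : Int) (toks.length : Int) := by
  cases hl : toks.drop i with
  | nil =>
    have hlen : toks.length ≤ i := by
      have := congrArg List.length hl; simp at this; omega
    rw [pvALoop3, pvRangeAll_neg _ (by exact_mod_cast hlen)]
  | cons t rest =>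
    have hget := pv_drop_get hl
    have hlt := pv_drop_lt hl
    obtain ⟨s, pos, det, conj⟩ := t
    have hF : pvF3 toks n (i : Int) =
        (if pos != "助詞" then true
         else if (i : Int) == 0 || (i : Int) == n - 1 then false
         else pvPart3 s ((PySem.List.pyGet? toks ((i : Int) - 1)).getD pvTokD).2.1
              ((PySem.List.pyGet? toks ((i : Int) + 1)).getD pvTokD).2.1) := by
      simp only [pvF3, pvGetT, PySem.List.pyGet?_natCast, hget, Option.getD_some]
    have ih := pvALoop3_eq toks n (i + 1)
    rw [pv_drop_rest hl] at ih
    rw [pvRangeAll_cons _ (by exact_mod_cast hlt), hF, pvALoop3]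
    push_cast at ih ⊢
    cases h1 : (pos != "助詞")
    · simp only [Bool.false_eq_true, if_false]
      cases h2 : ((i : Int) == 0 || (i : Int) == n - 1)
      · simp only [Bool.false_eq_true, if_false, pvPart3]
        cases h3 : (s == "が")
        · cases h4 : (s == "を")
          · cases h5 : (s == "に")
            · cases h6 : (s == "の")
              · cases h7 : (s == "と")
                · cases h8 : (s == "で")
                  · simp
                  · simp only [Bool.false_eq_true, if_false, if_true]
                    exact pv_step1 _ _ _ ih
                · simp only [Bool.false_eq_true, if_false, if_true]
                  exact pv_step1 _ _ _ ih
              · simp only [Bool.false_eq_true, if_false, if_true]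
                exact pv_step1 _ _ _ ih
            · simp only [Bool.false_eq_true, if_false, if_true]
              exact pv_step1 _ _ _ ih
          · simp only [Bool.false_eq_true, if_false, if_true]
            exact pv_step1 _ _ _ ih
        · simp only [if_true]
          exact pv_step1 _ _ _ ih
      · simp
    · simp only [if_true, Bool.true_and]
      exact ih
termination_by toks.length - i
decreasing_by omega

theorem pvALoop4_eq (toks : List pvTok) (a b : Int) :
    pvALoop4 toks (PySem.List.pyRange a b 1) = pvRangeAll (pvF4 toks) a b := by
  by_cases hab : a < b
  · rw [PySem.List.pyRange_one_cons hab, pvRangeAll_cons _ hab]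
    have ih := pvALoop4_eq toks (a + 1) b
    rw [pvALoop4, ih]
    simp only [pvF4, pvGetT]
    cases hm : PySem.Dict.get? pvNegRules ((PySem.List.pyGet? toks a).getD pvTokD).1 with
    | none => simp only [hm, Bool.true_and]
    | some allowed =>
      simp only [hm]
      exact pv_step2 _ _ _ _ rfl
  · rw [PySem.List.pyRange_one_eq_nil (by omega), pvRangeAll_neg _ (by omega)]; rfl
termination_by (b - a).toNat
decreasing_by simp_wf; omega

theorem pvALoop5_eq (toks : List pvTok) (a b : Int) :
    pvALoop5 toks (PySem.List.pyRange a b 1) = pvRangeAll (pvF5 toks) a b := by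
  by_cases hab : a < b
  · rw [PySem.List.pyRange_one_cons hab, pvRangeAll_cons _ hab]
    have ih := pvALoop5_eq toks (a + 1) b
    rw [pvALoop5, ih]
    simp only [pvF5, pvGetT]
    exact pv_step1 _ _ _ rfl
  · rw [PySem.List.pyRange_one_eq_nil (by omega), pvRangeAll_neg _ (by omega)]; rfl
termination_by (b - a).toNat
decreasing_by simp_wf; omega

theorem pvBLoop_eq (toks : List pvTok) (n : Int) (i : Nat) :
    pvBLoop toks n (i : Int) (toks.drop i) = pvRangeAll (pvFB toks n) (i : Int) (toks.length : Int) := by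
  cases hl : toks.drop i with
  | nil =>
    have hlen : toks.length ≤ i := by
      have := congrArg List.length hl; simp at this; omega
    rw [pvBLoop, pvRangeAll_neg _ (by exact_mod_cast hlen)]
  | cons t rest =>
    have hget := pv_drop_get hl
    have hlt := pv_drop_lt hl
    obtain ⟨s, pos, det, conj⟩ := t
    have hF : pvFB toks n (i : Int) =
        (if pos == "動詞" && (PySem.Str.startswith conj "未然形" || PySem.Str.startswith conj "仮定形") then false
         else if pos == "助動詞" && (if 0 < (i : Int) then (PySem.List.pyGet? toks ((i : Int) - 1)).map (fun t => t.2.1) else none) != some "動詞" then false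
         else if pos == "助詞" &&
           !(match PySem.Dict.get? pvParticleRules s,
               (if 0 < (i : Int) then (PySem.List.pyGet? toks ((i : Int) - 1)).map (fun t => t.2.1) else none),
               (if (i : Int) < n - 1 then PySem.List.pyGet? toks ((i : Int) + 1) else none) with
             | some rule, some pp, some t2 => rule.1.contains pp && rule.2.contains t2.2.1
             | _, _, _ => false) then false
         else if (match PySem.Dict.get? pvNegRules s,
               (if (i : Int) < n - 1 then PySem.List.pyGet? toks ((i : Int) + 1) else none) with
             | some allowed, some t2 => PySem.Str.startswith det "接頭辞" && !(allowed.contains t2.2.1)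
             | _, _ => false) then false
         else if PySem.Str.startswith det "接尾辞" &&
             ((i : Int) == 0 || (match (if (i : Int) < n - 1 then PySem.List.pyGet? toks ((i : Int) + 1) else none) with
               | some t2 => PySem.Str.startswith t2.2.2.1 "接尾辞" | none => false)) then false
         else if (if (i : Int) < n - 1 then PySem.List.pyGet? toks ((i : Int) + 1) else none) == none &&
             PySem.Str.startswith det "接頭辞" then false
         else true) := by
      simp only [pvFB, pvGetT, PySem.List.pyGet?_natCast, hget, Option.getD_some]
    have ih := pvBLoop_eq toks n (i + 1)
    rw [pv_drop_rest hl] at ih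
    rw [pvRangeAll_cons _ (by exact_mod_cast hlt), hF, pvBLoop]
    push_cast at ih ⊢
    exact pv_step6 _ _ _ _ _ _ _ _ ih
termination_by toks.length - i
decreasing_by omega

-- the particle if-chain equals the table lookup
theorem pvPart3_eq (surface pp np : String) :
    pvPart3 surface pp np =
      (match PySem.Dict.get? pvParticleRules surface with
       | some rule => rule.1.contains pp && rule.2.contains np
       | none => false) := by
  by_cases h1 : surface = "が"
  · subst h1
    have hg : PySem.Dict.get? pvParticleRules "が" = some (["名詞"], ["動詞", "形容詞", "名詞"]) := by rfl
    rw [hg]; simp [pvPart3, bne, Bool.not_not, beq_eq_decide]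
  by_cases h2 : surface = "を"
  · subst h2
    have hg : PySem.Dict.get? pvParticleRules "を" = some (["名詞"], ["動詞"]) := by rfl
    rw [hg]; simp [pvPart3, bne, Bool.not_not, beq_eq_decide]
  by_cases h3 : surface = "に"
  · subst h3
    have hg : PySem.Dict.get? pvParticleRules "に" = some (["名詞"], ["動詞", "名詞"]) := by rfl
    rw [hg]; simp [pvPart3, bne, Bool.not_not, beq_eq_decide]
  by_cases h4 : surface = "の"
  · subst h4
    have hg : PySem.Dict.get? pvParticleRules "の" = some (["名詞"], ["名詞"]) := by rfl
    rw [hg]; simp [pvPart3, bne, Bool.not_not, beq_eq_decide]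
  by_cases h5 : surface = "と"
  · subst h5
    have hg : PySem.Dict.get? pvParticleRules "と" = some (["名詞"], ["名詞", "動詞"]) := by rfl
    rw [hg]; simp [pvPart3, bne, Bool.not_not, beq_eq_decide]
  by_cases h6 : surface = "で"
  · subst h6
    have hg : PySem.Dict.get? pvParticleRules "で" = some (["名詞"], ["動詞", "形容詞"]) := by rfl
    rw [hg]; simp [pvPart3, bne, Bool.not_not, beq_eq_decide]
  have hnone : PySem.Dict.get? pvParticleRules surface = none := by
    simp only [pvParticleRules, PySem.Dict.get?_mk_cons, beq_iff_eq]
    rw [if_neg (Ne.symm h1), if_neg (Ne.symm h2), if_neg (Ne.symm h3), if_neg (Ne.symm h4),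
      if_neg (Ne.symm h5), if_neg (Ne.symm h6)]
    rfl
  rw [hnone]
  simp [pvPart3, beq_iff_eq, h1, h2, h3, h4, h5, h6, bne, Bool.not_not]

-- pointwise: B's fused condition is the conjunction of A's per-index conditions
theorem pvFB_pointwise (toks : List pvTok) (i : Int) (h0 : 0 ≤ i) (h1 : i < (toks.length : Int)) :
    pvFB toks (toks.length : Int) i =
      (pvF1 toks i && (pvF2 toks i && (pvF3 toks (toks.length : Int) i &&
       (pvG4 toks (toks.length : Int) i && (pvFhead toks i &&
       (pvG5 toks (toks.length : Int) i && pvFlast toks (toks.length : Int) i)))))) := by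
  have ht : PySem.List.pyGet? toks i = some (toks[i.toNat]) :=
    PySem.List.pyGet?_eq_some_getElem toks h0 h1
  unfold pvFB
  simp only [pvGetT, ht, Option.getD_some]
  rw [pv_conj6]
  by_cases hi0 : i = 0
  · subst hi0
    by_cases hil : (0 : Int) = (toks.length : Int) - 1
    · have hlen1 : toks.length = 1 := by omega
      simp only [if_neg (show ¬(0:Int) < 0 by omega),
        if_neg (show ¬(0:Int) < (toks.length : Int) - 1 by omega)]
      cases hg : pvParticleRules.get? (toks[0]'(by omega)).1 <;>
        cases hneg : pvNegRules.get? (toks[0]'(by omega)).1 <;>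
          simp [pvF1, pvF2, pvF3, pvG4, pvF4, pvFhead, pvG5, pvF5, pvFlast, pvGetT, ht,
            hg, hneg, hlen1, bne, beq_eq_decide, pv_absorb]
    · have hnx : PySem.List.pyGet? toks (1 : Int) = some (toks[(1:Int).toNat]) :=
        PySem.List.pyGet?_eq_some_getElem toks (by omega) (by omega)
      simp only [if_neg (show ¬(0:Int) < 0 by omega),
        if_pos (show (0:Int) < (toks.length : Int) - 1 by omega), zero_add, hnx]
      cases hg : pvParticleRules.get? (toks[0]'(by omega)).1 <;>
        cases hneg : pvNegRules.get? (toks[0]'(by omega)).1 <;>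
          simp [pvF1, pvF2, pvF3, pvG4, pvF4, pvFhead, pvG5, pvF5, pvFlast, pvGetT, ht, hnx,
            hg, hneg, bne, beq_eq_decide, pv_absorb, hil, show (1:Nat) < toks.length from by omega,
            show (0:Int) < (toks.length : Int) - 1 from by omega]
  · have hp : PySem.List.pyGet? toks (i - 1) = some (toks[(i-1).toNat]) :=
      PySem.List.pyGet?_eq_some_getElem toks (by omega) (by omega)
    by_cases hil : i = (toks.length : Int) - 1
    · have dlast : decide (i = (toks.length : Int) - 1) = true := by simp [hil]
      simp only [if_pos (show 0 < i by omega),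
        if_neg (show ¬ i < (toks.length : Int) - 1 by omega), hp]
      cases hg : pvParticleRules.get? toks[i.toNat].1 <;>
        cases hneg : pvNegRules.get? toks[i.toNat].1 <;>
          simp [pvF1, pvF2, pvF3, pvG4, pvF4, pvFhead, pvG5, pvF5, pvFlast, pvGetT, ht, hp,
            hg, hneg, bne, beq_eq_decide, pv_absorb, hi0, dlast, show ¬ i < (toks.length : Int) - 1 by omega]
    · have hnx : PySem.List.pyGet? toks (i + 1) = some (toks[(i+1).toNat]) :=
        PySem.List.pyGet?_eq_some_getElem toks (by omega) (by omega)
      simp only [if_pos (show 0 < i by omega),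
        if_pos (show i < (toks.length : Int) - 1 by omega), hp, hnx, Option.map_some]
      cases hg : pvParticleRules.get? toks[i.toNat].1 <;>
        cases hneg : pvNegRules.get? toks[i.toNat].1 <;>
          simp [pvF1, pvF2, pvF3, pvG4, pvF4, pvFhead, pvG5, pvF5, pvFlast, pvGetT, ht, hp, hnx,
            hg, hneg, bne, beq_eq_decide, pv_absorb, hi0, hil, pvPart3_eq, show 0 < i by omega,
            show i < (toks.length : Int) - 1 by omega]

-- A's token-building loop equals B's filterMap
theorem pvTokensA_step (l : List String) : ∀ (acc : List pvTok),
    l.foldl (fun tokens line =>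
      if line == "EOS" || PySem.Str.strip line == "" then tokens
      else
        let cols := (PySem.Str.split? line "\t").getD []
        if cols.length < 7 then tokens
        else
          let surface := cols.getD 0 ""
          let pos_detail := cols.getD 4 ""
          let pos := ((PySem.Str.split? pos_detail "-").getD []).getD 0 ""
          let conj_form := cols.getD 6 ""
          tokens ++ [(surface, pos, pos_detail, conj_form)]) acc = acc ++ l.filterMap pvToken? := by
  induction l with
  | nil => intro acc; simp
  | cons x xs ih =>
    intro acc
    rw [List.foldl_cons, List.filterMap_cons]
    by_cases hc1 : (x == "EOS" || PySem.Str.strip x == "") = true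
    · have ht : pvToken? x = none := by simp [pvToken?, hc1]
      simp only [hc1, if_true, ht, ih]
      all_goals simp
    · by_cases hc2 : ((PySem.Str.split? x "\t").getD []).length < 7
      · have ht : pvToken? x = none := by simp [pvToken?, hc1, hc2]
        simp only [hc1, if_false, hc2, if_true, ht, ih]
        all_goals simp
      · have ht : pvToken? x = some
            (((PySem.Str.split? x "\t").getD []).getD 0 "",
             ((PySem.Str.split? (((PySem.Str.split? x "\t").getD []).getD 4 "") "-").getD []).getD 0 "",
             ((PySem.Str.split? x "\t").getD []).getD 4 "",
             ((PySem.Str.split? x "\t").getD []).getD 6 "") := by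
          simp [pvToken?, hc1, hc2]
        simp only [hc1, if_false, hc2, ht, ih, List.append_assoc, List.singleton_append,
          List.cons_append, List.nil_append]
        simp [ih]

theorem pvTokensA_eq (parsed : List String) : pvTokensA parsed = parsed.filterMap pvToken? := by
  unfold pvTokensA
  simpa using pvTokensA_step parsed []

theorem pv_chain7 : ∀ (a b c d e f g : Bool),
    (if !a then false else if !b then false else if !c then false else if !d then false
     else if !e then false else if !f then false else if !g then false else true) =
    (a && (b && (c && (d && (e && (f && g)))))) := by decide

theorem pv_main : ∀ (parsed : List String), check_pos_usage parsed = check_pos_usage_alt parsed := by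
  intro parsed
  simp only [check_pos_usage, check_pos_usage_alt, pvTokensA_eq]
  generalize parsed.filterMap pvToken? = toks
  by_cases hnil : toks = []
  · subst hnil; decide
  · obtain ⟨t0, rest0, rfl⟩ := List.exists_cons_of_ne_nil hnil
    have hlen : (0 : Int) < (((t0 :: rest0).length : Int)) := by
      have : 0 < (t0 :: rest0).length := Nat.succ_pos rest0.length
      exact_mod_cast this
    have e1 : pvALoop1 (t0 :: rest0) =
        pvRangeAll (pvF1 (t0 :: rest0)) 0 ((t0 :: rest0).length : Int) := by
      simpa using pvALoop1_eq (t0 :: rest0) 0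
    have e2 : pvALoop2 (t0 :: rest0) 0 (t0 :: rest0) =
        pvRangeAll (pvF2 (t0 :: rest0)) 0 ((t0 :: rest0).length : Int) := by
      simpa using pvALoop2_eq (t0 :: rest0) 0
    have e3 : pvALoop3 (t0 :: rest0) ((t0 :: rest0).length : Int) 0 (t0 :: rest0) =
        pvRangeAll (pvF3 (t0 :: rest0) ((t0 :: rest0).length : Int)) 0 ((t0 :: rest0).length : Int) := by
      simpa using pvALoop3_eq (t0 :: rest0) ((t0 :: rest0).length : Int) 0
    have e4 : pvALoop4 (t0 :: rest0) (PySem.List.pyRange 0 (((t0 :: rest0).length : Int) - 1) 1) =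
        pvRangeAll (pvF4 (t0 :: rest0)) 0 (((t0 :: rest0).length : Int) - 1) :=
      pvALoop4_eq (t0 :: rest0) 0 _
    have e4b : pvRangeAll (pvF4 (t0 :: rest0)) 0 (((t0 :: rest0).length : Int) - 1) =
        pvRangeAll (pvG4 (t0 :: rest0) ((t0 :: rest0).length : Int)) 0 ((t0 :: rest0).length : Int) := by
      rw [pvRangeAll_congr 0 (((t0 :: rest0).length : Int) - 1)
        (f := pvF4 (t0 :: rest0)) (g := pvG4 (t0 :: rest0) ((t0 :: rest0).length : Int))
        (fun i hi1 hi2 => by simp only [pvG4]; rw [if_pos (by omega)])]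
      exact (pvRangeAll_extend (pvG4 (t0 :: rest0) ((t0 :: rest0).length : Int)) 0
        (((t0 :: rest0).length : Int) - 1) ((t0 :: rest0).length : Int) (by omega) (by omega)
        (fun i hi1 hi2 => by simp only [pvG4]; rw [if_neg (by omega)])).symm
    have e5 : pvALoop5 (t0 :: rest0) (PySem.List.pyRange 0 (((t0 :: rest0).length : Int) - 1) 1) =
        pvRangeAll (pvF5 (t0 :: rest0)) 0 (((t0 :: rest0).length : Int) - 1) :=
      pvALoop5_eq (t0 :: rest0) 0 _
    have e5b : pvRangeAll (pvF5 (t0 :: rest0)) 0 (((t0 :: rest0).length : Int) - 1) =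
        pvRangeAll (pvG5 (t0 :: rest0) ((t0 :: rest0).length : Int)) 0 ((t0 :: rest0).length : Int) := by
      rw [pvRangeAll_congr 0 (((t0 :: rest0).length : Int) - 1)
        (f := pvF5 (t0 :: rest0)) (g := pvG5 (t0 :: rest0) ((t0 :: rest0).length : Int))
        (fun i hi1 hi2 => by simp only [pvG5]; rw [if_pos (by omega)])]
      exact (pvRangeAll_extend (pvG5 (t0 :: rest0) ((t0 :: rest0).length : Int)) 0
        (((t0 :: rest0).length : Int) - 1) ((t0 :: rest0).length : Int) (by omega) (by omega)
        (fun i hi1 hi2 => by simp only [pvG5]; rw [if_neg (by omega)])).symm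
    have ehead : (match t0 :: rest0 with
        | [] => false
        | t :: _ => PySem.Str.startswith t.2.2.1 "接尾辞") =
        !(pvRangeAll (pvFhead (t0 :: rest0)) 0 ((t0 :: rest0).length : Int)) := by
      rw [pvRangeAll_cons _ hlen,
        pvRangeAll_of_forall _ (0 + 1) _ (fun i hi1 hi2 => by
          simp only [pvFhead]; rw [if_neg (by simp only [beq_iff_eq]; omega)])]
      simp [pvFhead, pvGetT, PySem.List.pyGet?_zero_cons]
    have elast : (match PySem.List.pyGet? (t0 :: rest0) (-1) with
        | some t => PySem.Str.startswith t.2.2.1 "接頭辞"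
        | none => false) =
        !(pvRangeAll (pvFlast (t0 :: rest0) ((t0 :: rest0).length : Int)) 0 ((t0 :: rest0).length : Int)) := by
      rw [PySem.List.pyGet?_neg_one]
      rw [pvRangeAll_eq_single (pvFlast (t0 :: rest0) ((t0 :: rest0).length : Int)) 0
        ((t0 :: rest0).length : Int) (((t0 :: rest0).length : Int) - 1) (by omega) (by omega)
        (fun i hi1 hi2 hne => by
          simp only [pvFlast]; rw [if_neg (by simp only [beq_iff_eq]; omega)])]
      rw [List.getLast?_eq_getElem?]
      rw [List.getElem?_eq_getElem (by omega : (t0 :: rest0).length - 1 < (t0 :: rest0).length)]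
      simp only [pvFlast, pvGetT]
      rw [if_pos (by simp)]
      rw [PySem.List.pyGet?_eq_some_getElem (t0 :: rest0) (by omega) (by omega)]
      simp only [Option.getD_some, Bool.not_not,
        show ((((t0 :: rest0).length : Int) - 1)).toNat = (t0 :: rest0).length - 1 from by omega]
    have eB : pvBLoop (t0 :: rest0) ((t0 :: rest0).length : Int) 0 (t0 :: rest0) =
        pvRangeAll (pvFB (t0 :: rest0) ((t0 :: rest0).length : Int)) 0 ((t0 :: rest0).length : Int) := by
      simpa using pvBLoop_eq (t0 :: rest0) ((t0 :: rest0).length : Int) 0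
    have eBs : pvRangeAll (pvFB (t0 :: rest0) ((t0 :: rest0).length : Int)) 0 ((t0 :: rest0).length : Int) =
        (pvRangeAll (pvF1 (t0 :: rest0)) 0 ((t0 :: rest0).length : Int) &&
          (pvRangeAll (pvF2 (t0 :: rest0)) 0 ((t0 :: rest0).length : Int) &&
            (pvRangeAll (pvF3 (t0 :: rest0) ((t0 :: rest0).length : Int)) 0 ((t0 :: rest0).length : Int) &&
              (pvRangeAll (pvG4 (t0 :: rest0) ((t0 :: rest0).length : Int)) 0 ((t0 :: rest0).length : Int) &&
                (pvRangeAll (pvFhead (t0 :: rest0)) 0 ((t0 :: rest0).length : Int) &&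
                  (pvRangeAll (pvG5 (t0 :: rest0) ((t0 :: rest0).length : Int)) 0 ((t0 :: rest0).length : Int) &&
                    pvRangeAll (pvFlast (t0 :: rest0) ((t0 :: rest0).length : Int)) 0 ((t0 :: rest0).length : Int))))))) := by
      rw [pvRangeAll_congr 0 ((t0 :: rest0).length : Int)
        (fun i hi1 hi2 => pvFB_pointwise (t0 :: rest0) i hi1 hi2)]
      simp only [pvRangeAll_and]
    rw [e1, e2, e3, e4, e4b, e5, e5b, ehead, elast, eB, eBs]
    exact pv_chain7 _ _ _ _ _ _ _

-- ===== VERDICT (by name: the statement is the Claim_ definition above) =====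
theorem check_pos_usage_spec : Claim_equal_check_pos_usage := by
  intro parsed _
  unfold Spec_check_pos_usage
  exact pv_main parsed
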